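-- pv_equiv track=rewrite | github.com/Shik3x9/email-generator | app.py | generate_emails
-- ===== SOURCE A (Python) =====
-- def generate_emails(local, domain, max_count=None):
--     n = len(local)
--     num_gaps = max(n - 1, 0)
--     total = 1 << num_gaps
--     limit = total if max_count is None else min(max_count, total)
--     emails = []
--     for mask in range(limit):
--         modified = []
--         for i in range(n):
--             modified.append(local[i])
--             if i < num_gaps and (mask & (1 << (num_gaps - 1 - i))):
--                 modified.append('.')
--         emails.append(''.join(modified) + '@' + domain)
--     return emails
-- ===== SOURCE B (Python) =====
-- def generate_emails(local, domain, max_count=None):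
--     total = 1 << max(len(local) - 1, 0)
--     limit = total if max_count is None else min(max_count, total)
--     out = []
--
--     def dfs(rest, acc):
--         if len(out) >= limit:
--             return
--         if len(rest) <= 1:
--             out.append(acc + rest + '@' + domain)
--         else:
--             dfs(rest[1:], acc + rest[0])
--             dfs(rest[1:], acc + rest[0] + '.')
--
--     if limit > 0:
--         dfs(local, '')
--     return out
-- ===== Notes on version B (the rewrite author's own statement) =====
-- stated objective: alternative
-- what changed: Replaces the bitmask counter (one pass over the string per mask, testing a bit per gap) by a recursive DFS over the gaps that accumulates the partial local part, branching no-dot first so the enumeration order matches the mask order, and stops as soon as limit emails are collected.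
import Mathlib
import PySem

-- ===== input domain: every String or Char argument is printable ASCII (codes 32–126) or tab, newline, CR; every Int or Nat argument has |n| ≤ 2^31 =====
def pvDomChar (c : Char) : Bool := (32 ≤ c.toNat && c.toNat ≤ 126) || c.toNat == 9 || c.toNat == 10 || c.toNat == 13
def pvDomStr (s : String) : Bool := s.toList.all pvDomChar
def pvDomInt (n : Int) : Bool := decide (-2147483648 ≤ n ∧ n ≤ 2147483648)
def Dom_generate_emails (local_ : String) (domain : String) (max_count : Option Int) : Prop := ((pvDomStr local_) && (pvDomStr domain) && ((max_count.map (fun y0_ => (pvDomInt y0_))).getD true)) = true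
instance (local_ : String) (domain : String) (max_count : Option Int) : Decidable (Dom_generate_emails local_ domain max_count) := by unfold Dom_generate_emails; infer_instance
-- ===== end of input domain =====

-- B replaces A's bitmask counter by a recursive DFS over the gaps (no-dot branch first, so the
-- enumeration order matches A's mask order), stopping once `limit` emails are collected.

-- ===== PORT A =====
-- literal transliteration of A: for mask in range(limit), rebuild the local part scanning
-- positions i in range(n), appending '.' after local[i] when bit (num_gaps-1-i) of mask is set.
-- `1 << num_gaps` is ported as `2 ^ num_gaps.toNat` (num_gaps = max (n-1) 0 ≥ 0, so exact);
-- `local[i]` via pyGetD (i always in 0..n-1 here, so exact).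
def generate_emails (local_ : String) (domain : String) (max_count : Option Int) : List String :=
  let cs := local_.toList
  let n : Int := cs.length
  let num_gaps : Int := max (n - 1) 0
  let total : Int := 2 ^ num_gaps.toNat
  let limit : Int := match max_count with
    | none => total
    | some m => min m total
  (PySem.List.pyRange 0 limit 1).foldl (fun emails mask =>
    let modified := (PySem.List.pyRange 0 n 1).foldl (fun modified i =>
      let modified := modified ++ [PySem.List.pyGetD cs i ' ']
      if i < num_gaps && (mask.toNat &&& (1 <<< (num_gaps - 1 - i).toNat) != 0)
      then modified ++ ['.'] else modified) ([] : List Char)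
    emails ++ [String.ofList modified ++ "@" ++ domain]) []

-- ===== PORT B =====
-- B's dfs(rest, acc): stop once `limit` outputs exist; at a leaf (len(rest) <= 1) emit
-- acc + rest + '@' + domain; otherwise recurse first without, then with a dot after rest[0].
def geAltDfs (domain : String) (limit : Int) : List Char → List Char → List String → List String
  | rest, acc, out =>
    if limit ≤ (out.length : Int) then out
    else
      match rest with
      | c :: d :: rest' =>
          geAltDfs domain limit (d :: rest') (acc ++ [c, '.'])
            (geAltDfs domain limit (d :: rest') (acc ++ [c]) out)
      | r => out ++ [String.ofList (acc ++ r) ++ "@" ++ domain]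
  termination_by rest _ _ => rest.length

def generate_emails_alt (local_ : String) (domain : String) (max_count : Option Int) : List String :=
  let total : Int := 2 ^ (max ((local_.toList.length : Int) - 1) 0).toNat
  let limit : Int := match max_count with
    | none => total
    | some m => min m total
  if 0 < limit then geAltDfs domain limit local_.toList [] [] else []

-- ===== PRECONDITION & SPEC =====
def Spec_generate_emails (local_ : String) (domain : String) (max_count : Option Int) (out : List String) : Prop := out = generate_emails_alt local_ domain max_count
instance (local_ : String) (domain : String) (max_count : Option Int) (out : List String) : Decidable (Spec_generate_emails local_ domain max_count out) := by unfold Spec_generate_emails; infer_instance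

-- ===== CLAIM (what is proved, stated in full; the proofs are below) =====
def Claim_equal_generate_emails : Prop := ∀ (local_ : String) (domain : String) (max_count : Option Int), Dom_generate_emails local_ domain max_count → Spec_generate_emails local_ domain max_count (generate_emails local_ domain max_count)

-- ===== LEMMAS AND PROOFS =====

-- the full enumeration of dot-variants, in A's mask order / B's DFS order
def geFull : List Char → List (List Char)
  | [] => [[]]
  | [c] => [[c]]
  | c :: d :: rest =>
      (geFull (d :: rest)).map (fun v => c :: v)
      ++ (geFull (d :: rest)).map (fun v => c :: '.' :: v)

-- the variant A builds for a given mask, recursively (bit (|rest|-1) governs the first gap)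
def geDots : List Char → Nat → List Char
  | [], _ => []
  | [c], _ => [c]
  | c :: d :: rest, m =>
      c :: ((if m.testBit ((d :: rest).length - 1) then ['.'] else []) ++ geDots (d :: rest) m)

lemma bitTest (m j : Nat) : (m &&& (1 <<< j) != 0) = m.testBit j := by
  rw [Nat.one_shiftLeft, Nat.and_two_pow]
  cases h : m.testBit j <;> simp

lemma geDots_congr : ∀ (cs : List Char) (m₁ m₂ : Nat),
    (∀ k, k < cs.length - 1 → m₁.testBit k = m₂.testBit k) →
    geDots cs m₁ = geDots cs m₂ := by
  intro cs
  induction cs with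
  | nil => intro _ _ _; rfl
  | cons c rest ih =>
    cases rest with
    | nil => intro _ _ _; rfl
    | cons d rest' =>
      intro m₁ m₂ h
      simp only [geDots]
      rw [h _ (by simp), ih m₁ m₂ (fun k hk => h k (by simp at hk ⊢; omega))]

lemma map_range_geDots : ∀ (cs : List Char),
    (List.range (2 ^ (cs.length - 1))).map (geDots cs) = geFull cs := by
  intro cs
  induction cs with
  | nil => simp [geDots, geFull]
  | cons c rest ih =>
    cases rest with
    | nil => simp [geDots, geFull]
    | cons d rest' =>
      set g := (d :: rest').length - 1 with hg
      have hlen : (c :: d :: rest').length - 1 = g + 1 := by simp [hg]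
      rw [hlen, pow_succ, mul_two, List.range_add, List.map_append, List.map_map]
      have hfirst : (List.range (2 ^ g)).map (geDots (c :: d :: rest')) =
          ((List.range (2 ^ g)).map (geDots (d :: rest'))).map (fun v => c :: v) := by
        rw [List.map_map]
        refine List.map_congr_left ?_
        intro m hm
        simp only [List.mem_range] at hm
        simp only [Function.comp, geDots, ← hg, Nat.testBit_lt_two_pow hm]
        simp
      have hsecond : (List.range (2 ^ g)).map (geDots (c :: d :: rest') ∘ (fun k => 2 ^ g + k)) =
          ((List.range (2 ^ g)).map (geDots (d :: rest'))).map (fun v => c :: '.' :: v) := by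
        rw [List.map_map]
        refine List.map_congr_left ?_
        intro m hm
        simp only [List.mem_range] at hm
        have ht : (2 ^ g + m).testBit g = true := by
          rw [Nat.testBit_two_pow_add_eq, Nat.testBit_lt_two_pow hm]
          rfl
        simp only [Function.comp, geDots, ← hg, ht]
        rw [geDots_congr (d :: rest') (2 ^ g + m) m
          (fun k hk => Nat.testBit_two_pow_add_gt (by omega) m)]
        simp
      rw [hfirst, hsecond, ih]
      simp [geFull]

lemma flatMap_geDots : ∀ (cs : List Char) (m : Nat),
    (PySem.List.pyRange 0 (cs.length : Int) 1).flatMap (fun i =>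
      [PySem.List.pyGetD cs i ' '] ++
        (if (i < max ((cs.length : Int) - 1) 0 &&
            (m &&& (1 <<< ((max ((cs.length : Int) - 1) 0) - 1 - i).toNat) != 0))
         then ['.'] else [])) = geDots cs m := by
  intro cs
  induction cs with
  | nil => intro m; simp [geDots, PySem.List.pyRange_one_eq_nil]
  | cons c rest ih =>
    cases rest with
    | nil =>
      intro m
      have h1 : PySem.List.pyRange 0 (([c] : List Char).length : Int) 1 = [0] := by
        simp [pysem]
      rw [h1]
      simp [geDots]
    | cons d rest' =>
      intro m
      set s : List Char := d :: rest' with hs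
      have hlen : ((c :: s).length : Int) = (s.length : Int) + 1 := by simp
      have hmaxc : max (((c :: s).length : Int) - 1) 0 = (s.length : Int) := by
        rw [hlen]; omega
      have hmaxs : max ((s.length : Int) - 1) 0 = (s.length : Int) - 1 := by
        have h1 : (1:Int) ≤ s.length := by simp [hs]
        omega
      have hcons : PySem.List.pyRange 0 ((c :: s).length : Int) 1 =
          0 :: PySem.List.pyRange 1 ((c :: s).length : Int) 1 :=
        PySem.List.pyRange_one_cons (by rw [hlen]; positivity)
      rw [hcons, List.flatMap_cons]
      have hhead : [PySem.List.pyGetD (c :: s) 0 ' '] ++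
          (if ((0:Int) < max (((c :: s).length : Int) - 1) 0 &&
              (m &&& (1 <<< ((max (((c :: s).length : Int) - 1) 0) - 1 - 0).toNat) != 0))
           then ['.'] else []) =
          c :: (if m.testBit (s.length - 1) then ['.'] else []) := by
        rw [hmaxc]
        have h0 : (0:Int) < (s.length : Int) := by simp [hs]
        have hj : (((s.length : Int)) - 1 - 0).toNat = s.length - 1 := by omega
        rw [hj, bitTest]
        simp [hs]
      have htail : (PySem.List.pyRange 1 ((c :: s).length : Int) 1).flatMap (fun i =>
          [PySem.List.pyGetD (c :: s) i ' '] ++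
            (if (i < max (((c :: s).length : Int) - 1) 0 &&
                (m &&& (1 <<< ((max (((c :: s).length : Int) - 1) 0) - 1 - i).toNat) != 0))
             then ['.'] else [])) =
          (PySem.List.pyRange 0 (s.length : Int) 1).flatMap (fun i =>
          [PySem.List.pyGetD s i ' '] ++
            (if (i < max ((s.length : Int) - 1) 0 &&
                (m &&& (1 <<< ((max ((s.length : Int) - 1) 0) - 1 - i).toNat) != 0))
             then ['.'] else [])) := by
        rw [PySem.List.pyRange_one, PySem.List.pyRange_one]
        have hn : (((c :: s).length : Int) - 1).toNat = ((s.length : Int) - 0).toNat := by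
          rw [hlen]; omega
        rw [hn, List.flatMap_map, List.flatMap_map]
        apply List.flatMap_congr
        intro k hk
        simp only [List.mem_range] at hk
        have hi1 : (1:Int) + (k : Nat) = ((k + 1 : Nat) : Int) := by push_cast; ring
        have hi0 : (0:Int) + (k : Nat) = ((k : Nat) : Int) := by ring
        rw [hi1, hi0, PySem.List.pyGetD_natCast, PySem.List.pyGetD_natCast, hmaxc, hmaxs]
        have hgetD : (c :: s).getD (k + 1) ' ' = s.getD k ' ' := by
          simp [List.getD]
        have hd : (decide (((k + 1 : Nat) : Int) < (s.length : Int))) =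
            (decide (((k : Nat) : Int) < (s.length : Int) - 1)) := by
          rw [decide_eq_decide]; push_cast; omega
        have hbit : ((s.length : Int) - 1 - ((k + 1 : Nat) : Int)).toNat =
            ((s.length : Int) - 1 - 1 - ((k : Nat) : Int)).toNat := by
          omega
        rw [hgetD, hd, hbit]
      rw [hhead, htail, ih m]
      simp [geDots, hs]

-- A's inner loop computes geDots
lemma innerA_eq_geDots (cs : List Char) (k : Nat) :
    (PySem.List.pyRange 0 (cs.length : Int) 1).foldl (fun modified i =>
      let modified := modified ++ [PySem.List.pyGetD cs i ' ']
      if i < max ((cs.length : Int) - 1) 0 &&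
          (((k : Int)).toNat &&& (1 <<< ((max ((cs.length : Int) - 1) 0) - 1 - i).toNat) != 0)
      then modified ++ ['.'] else modified) ([] : List Char) = geDots cs k := by
  have hb : (fun (modified : List Char) (i : Int) =>
      let modified := modified ++ [PySem.List.pyGetD cs i ' ']
      if i < max ((cs.length : Int) - 1) 0 &&
          (((k : Int)).toNat &&& (1 <<< ((max ((cs.length : Int) - 1) 0) - 1 - i).toNat) != 0)
      then modified ++ ['.'] else modified) =
      (fun (modified : List Char) (i : Int) => modified ++ ([PySem.List.pyGetD cs i ' '] ++
        (if (i < max ((cs.length : Int) - 1) 0 &&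
            (k &&& (1 <<< ((max ((cs.length : Int) - 1) 0) - 1 - i).toNat) != 0))
         then ['.'] else []))) := by
    funext modified i
    simp only [Int.toNat_natCast]
    split <;> simp
  rw [hb, PySem.List.foldl_append_eq_flatMap, flatMap_geDots]
  simp

-- B's dfs = take of the mapped full enumeration
lemma geAltDfs_eq_take (domain : String) (limit : Int) : ∀ (rest acc : List Char) (out : List String),
    geAltDfs domain limit rest acc out =
      out ++ (((geFull rest).map (fun v => String.ofList (acc ++ v) ++ "@" ++ domain)).take
        (limit - out.length).toNat) := by
  intro rest
  induction rest with
  | nil =>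
    intro acc out
    simp only [geAltDfs]
    by_cases h : limit ≤ (out.length : Int)
    · have h0 : (limit - (out.length : Int)).toNat = 0 := by omega
      rw [if_pos h, h0]
      simp
    · have h1 : 1 ≤ (limit - (out.length : Int)).toNat := by omega
      rw [if_neg h, List.take_of_length_le (by simpa [geFull] using h1)]
      simp [geFull]
  | cons c rest ih =>
    cases rest with
    | nil =>
      intro acc out
      simp only [geAltDfs]
      by_cases h : limit ≤ (out.length : Int)
      · have h0 : (limit - (out.length : Int)).toNat = 0 := by omega
        rw [if_pos h, h0]
        simp
      · have h1 : 1 ≤ (limit - (out.length : Int)).toNat := by omega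
        rw [if_neg h, List.take_of_length_le (by simpa [geFull] using h1)]
        simp [geFull]
    | cons d rest' =>
      intro acc out
      simp only [geAltDfs]
      by_cases h : limit ≤ (out.length : Int)
      · have h0 : (limit - (out.length : Int)).toNat = 0 := by omega
        rw [if_pos h, h0]
        simp
      · rw [if_neg h]
        rw [ih (acc ++ [c]) out, ih (acc ++ [c, '.'])]
        simp only [geFull, List.map_append, List.map_map]
        rw [List.take_append]
        have e1 : (geFull (d :: rest')).map ((fun v => String.ofList (acc ++ v) ++ "@" ++ domain) ∘ (fun v => c :: v)) =
            (geFull (d :: rest')).map (fun v => String.ofList ((acc ++ [c]) ++ v) ++ "@" ++ domain) := by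
          simp
        have e2 : (geFull (d :: rest')).map ((fun v => String.ofList (acc ++ v) ++ "@" ++ domain) ∘ (fun v => c :: '.' :: v)) =
            (geFull (d :: rest')).map (fun v => String.ofList ((acc ++ [c, '.']) ++ v) ++ "@" ++ domain) := by
          simp
        rw [e1, e2]
        rw [List.append_assoc]
        congr 2
        simp [List.length_take]
        omega

lemma mainEq (domain : String) (cs : List Char) (limit : Int)
    (hle : limit ≤ 2 ^ (max ((cs.length : Int) - 1) 0).toNat) :
    (PySem.List.pyRange 0 limit 1).foldl (fun emails mask =>
      emails ++ [String.ofList ((PySem.List.pyRange 0 (cs.length : Int) 1).foldl (fun modified i =>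
        let modified := modified ++ [PySem.List.pyGetD cs i ' ']
        if i < max ((cs.length : Int) - 1) 0 &&
            (mask.toNat &&& (1 <<< ((max ((cs.length : Int) - 1) 0) - 1 - i).toNat) != 0)
        then modified ++ ['.'] else modified) ([] : List Char)) ++ "@" ++ domain]) []
    = (if 0 < limit then geAltDfs domain limit cs [] [] else []) := by
  rw [PySem.List.foldl_append_singleton_eq_map, PySem.List.pyRange_one 0 limit, List.map_map]
  have hmaps : ∀ k ∈ List.range (limit - 0).toNat,
      ((fun mask =>
        String.ofList ((PySem.List.pyRange 0 (cs.length : Int) 1).foldl (fun modified i =>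
          let modified := modified ++ [PySem.List.pyGetD cs i ' ']
          if i < max ((cs.length : Int) - 1) 0 &&
              (mask.toNat &&& (1 <<< ((max ((cs.length : Int) - 1) 0) - 1 - i).toNat) != 0)
          then modified ++ ['.'] else modified) ([] : List Char)) ++ "@" ++ domain) ∘
        (fun (k : Nat) => (0 : Int) + (k : Int))) k
      = String.ofList (geDots cs k) ++ "@" ++ domain := by
    intro k _
    have h0 : ((0 : Int) + (k : Int)) = ((k : Nat) : Int) := by ring
    simp only [Function.comp_apply, h0]
    rw [innerA_eq_geDots]
  rw [List.map_congr_left hmaps]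
  have hG : (max ((cs.length : Int) - 1) 0).toNat = cs.length - 1 := by omega
  have h2 : (limit - 0).toNat ≤ 2 ^ (cs.length - 1) := by
    rw [hG] at hle
    apply Int.toNat_le.mpr
    push_cast
    omega
  rw [show List.range (limit - 0).toNat
        = (List.range (2 ^ (cs.length - 1))).take (limit - 0).toNat by
      rw [List.take_range, Nat.min_eq_left h2]]
  rw [List.map_take]
  rw [show (List.range (2 ^ (cs.length - 1))).map (fun a => String.ofList (geDots cs a) ++ "@" ++ domain)
        = ((List.range (2 ^ (cs.length - 1))).map (geDots cs)).map (fun v => String.ofList v ++ "@" ++ domain) by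
      rw [List.map_map]
      rfl]
  rw [map_range_geDots]
  by_cases hpos : 0 < limit
  · rw [if_pos hpos, geAltDfs_eq_take]
    simp
  · rw [if_neg hpos]
    have : (limit - 0).toNat = 0 := by omega
    rw [this]
    simp

-- ===== VERDICT (by name: the statement is the Claim_ definition above) =====
theorem generate_emails_spec : Claim_equal_generate_emails := by
  unfold Claim_equal_generate_emails Spec_generate_emails
  intro local_ domain max_count _
  unfold generate_emails generate_emails_alt
  have hle : (match max_count with
      | none => (2:Int) ^ (max ((local_.toList.length : Int) - 1) 0).toNat
      | some m => min m ((2:Int) ^ (max ((local_.toList.length : Int) - 1) 0).toNat))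
      ≤ 2 ^ (max ((local_.toList.length : Int) - 1) 0).toNat := by
    cases max_count with
    | none => exact le_refl _
    | some m => exact min_le_right _ _
  exact mainEq domain local_.toList _ hle
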